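-- pv_equiv track=rewrite | github.com/MrBrantCode/unitest_baseline | mut_generate/mist_train_taco/taco_1194/solution.py | is_valley
-- ===== SOURCE A (Python) =====
-- def is_valley(a):
--     n = len(a)
--
--     # Find all subarrays where all elements are the same
--     subarrays = []
--     i = 0
--     while i < n:
--         start = i
--         while i + 1 < n and a[i] == a[i + 1]:
--             i += 1
--         end = i
--         subarrays.append((start, end))
--         i += 1
--
--     # Check if there is exactly one subarray that satisfies the valley condition
--     valley_count = 0
--     for l, r in subarrays:
--         if (l == 0 or a[l - 1] > a[l]) and (r == n - 1 or a[r] < a[r + 1]):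
--             valley_count += 1
--
--     return valley_count == 1
-- ===== SOURCE B (Python) =====
-- def is_valley(a):
--     n = len(a)
--     count = 0
--     going_down = True  # the left edge counts as a descent
--     i = 0
--     while i < n:
--         # skip to the end of the current run of equal values
--         while i + 1 < n and a[i] == a[i + 1]:
--             i += 1
--         up = i == n - 1 or a[i] < a[i + 1]
--         if going_down and up:
--             count += 1
--         going_down = not up
--         i += 1
--     return count == 1
-- ===== Notes on version B (the rewrite author's own statement) =====
-- stated objective: simpler
-- what changed: Single streaming pass with a direction flag and a running counter instead of first materialising the list of equal-value run boundaries and then re-scanning it with neighbour lookups.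
import Mathlib
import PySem

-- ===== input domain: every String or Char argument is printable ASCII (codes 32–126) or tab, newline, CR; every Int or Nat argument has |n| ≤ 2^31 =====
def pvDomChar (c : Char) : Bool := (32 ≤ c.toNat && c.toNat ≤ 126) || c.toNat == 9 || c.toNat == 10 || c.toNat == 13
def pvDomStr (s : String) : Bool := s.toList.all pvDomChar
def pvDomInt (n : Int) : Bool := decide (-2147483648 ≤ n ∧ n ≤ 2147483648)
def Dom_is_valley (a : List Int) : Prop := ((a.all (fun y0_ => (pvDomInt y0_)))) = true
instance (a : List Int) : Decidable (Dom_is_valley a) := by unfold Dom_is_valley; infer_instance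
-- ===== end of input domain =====

-- B replaces A's two-phase run-list construction + rescan by one streaming pass with a
-- direction flag and a counter (same result, O(1) extra space; objective: simpler).


-- ===== PORT A =====
-- all indices the Python touches are in range, so a[i] is ported as (a[i]?).getD 0 (exact here);
-- both while loops carry an explicit fuel counter (called with fuel = n, always sufficient) purely to make them total
def aGet (a : List Int) (i : Nat) : Int := (a[i]?).getD 0

-- inner 'while i + 1 < n and a[i] == a[i+1]: i += 1' — returns the final i
def runEnd (a : List Int) (n : Nat) : Nat → Nat → Nat
  | 0, i => i
  | f + 1, i => if i + 1 < n ∧ aGet a i = aGet a (i + 1) then runEnd a n f (i + 1) else i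

-- outer 'while i < n' collecting (start, end) pairs
def buildSubs (a : List Int) (n : Nat) : Nat → Nat → List (Nat × Nat)
  | 0, _ => []
  | f + 1, i =>
    if i < n then (i, runEnd a n n i) :: buildSubs a n f (runEnd a n n i + 1) else []

-- 'for l, r in subarrays: if (l == 0 or a[l-1] > a[l]) and (r == n-1 or a[r] < a[r+1]): valley_count += 1'
def countValleys (a : List Int) (n : Nat) (subs : List (Nat × Nat)) (c : Nat) : Nat :=
  subs.foldl (fun c p =>
    if ((p.1 == 0) || decide (aGet a (p.1 - 1) > aGet a p.1)) &&
       ((p.2 == n - 1) || decide (aGet a p.2 < aGet a (p.2 + 1))) then c + 1 else c) c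

def is_valley (a : List Int) : Bool :=
  countValleys a a.length (buildSubs a a.length a.length 0) 0 == 1

-- ===== PORT B =====
def bGet (a : List Int) (i : Nat) : Int := (a[i]?).getD 0

-- inner run-skipping while loop of B (fuel = n at each call, always sufficient)
def bSkip (a : List Int) (n : Nat) : Nat → Nat → Nat
  | 0, i => i
  | f + 1, i => if i + 1 < n ∧ bGet a i = bGet a (i + 1) then bSkip a n f (i + 1) else i

-- outer streaming loop: direction flag + counter
def bLoop (a : List Int) (n : Nat) : Nat → Nat → Bool → Nat → Nat
  | 0, _, _, count => count
  | f + 1, i, goingDown, count =>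
    if i < n then
      bLoop a n f (bSkip a n n i + 1)
        (!((bSkip a n n i == n - 1) || decide (bGet a (bSkip a n n i) < bGet a (bSkip a n n i + 1))))
        (if goingDown &&
            ((bSkip a n n i == n - 1) || decide (bGet a (bSkip a n n i) < bGet a (bSkip a n n i + 1)))
         then count + 1 else count)
    else count

def is_valley_alt (a : List Int) : Bool :=
  bLoop a a.length a.length 0 true 0 == 1

-- ===== PRECONDITION & SPEC =====
def Spec_is_valley (a : List Int) (out : Bool) : Prop := out = is_valley_alt a
instance (a : List Int) (out : Bool) : Decidable (Spec_is_valley a out) := by unfold Spec_is_valley; infer_instance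

-- ===== CLAIM (what is proved, stated in full; the proofs are below) =====
def Claim_equal_is_valley : Prop := ∀ (a : List Int), Dom_is_valley a → Spec_is_valley a (is_valley a)

-- ===== LEMMAS AND PROOFS =====

theorem bGet_eq_aGet (a : List Int) (i : Nat) : bGet a i = aGet a i := rfl

theorem bSkip_eq_runEnd (a : List Int) (n f i : Nat) : bSkip a n f i = runEnd a n f i := by
  induction f generalizing i with
  | zero => rfl
  | succ f ih =>
    simp only [bSkip, runEnd, bGet_eq_aGet]
    split
    · exact ih (i + 1)
    · rfl

theorem runEnd_ge (a : List Int) (n f i : Nat) : i ≤ runEnd a n f i := by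
  induction f generalizing i with
  | zero => exact Nat.le_refl i
  | succ f ih =>
    simp only [runEnd]
    split
    · exact Nat.le_trans (Nat.le_succ i) (ih (i + 1))
    · exact Nat.le_refl i

-- with enough fuel the inner loop really stops: its exit condition fails at the result
theorem runEnd_stop (a : List Int) (n f i : Nat) (hf : n ≤ f + i) :
    ¬ (runEnd a n f i + 1 < n ∧ aGet a (runEnd a n f i) = aGet a (runEnd a n f i + 1)) := by
  induction f generalizing i with
  | zero => simp only [runEnd]; omega
  | succ f ih =>
    simp only [runEnd]
    split
    · exact ih (i + 1) (by omega)
    · simpa [runEnd] using (by assumption : ¬(i + 1 < n ∧ aGet a i = aGet a (i + 1)))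

-- at a run boundary the two values differ, so 'not (<)' is exactly '>'
theorem flip_dir (x y : Int) (hne : x ≠ y) : (!decide (x < y)) = decide (x > y) := by
  rcases lt_trichotomy x y with hc | hc | hc
  · simp [hc, not_lt.mpr (le_of_lt hc)]
  · exact absurd hc hne
  · simp [hc, not_lt.mpr (le_of_lt hc)]

-- main invariant: if gd records whether the run starting at i was entered descending
-- (left edge counts as descent), the streaming loop computes A's fold
theorem main_lemma (a : List Int) (n : Nat) :
    ∀ (f i : Nat) (gd : Bool) (c : Nat), n ≤ f + i →
      (i < n → gd = ((i == 0) || decide (aGet a (i - 1) > aGet a i))) →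
      bLoop a n f i gd c = countValleys a n (buildSubs a n f i) c := by
  intro f
  induction f with
  | zero => intro i gd c hf hgd; rfl
  | succ f ih =>
    intro i gd c hf hgd
    by_cases hi : i < n
    · simp only [bLoop, buildSubs, if_pos hi]
      unfold countValleys
      simp only [List.foldl_cons, bSkip_eq_runEnd, bGet_eq_aGet]
      rw [hgd hi]
      have hge := runEnd_ge a n n i
      refine Eq.trans (ih (runEnd a n n i + 1) _ _ (by omega) ?_) rfl
      -- invariant at the next run start
      intro hlt
      have hstop := runEnd_stop a n n i (by omega)
      have hne : aGet a (runEnd a n n i) ≠ aGet a (runEnd a n n i + 1) :=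
        fun he => hstop ⟨hlt, he⟩
      have hnlast : (runEnd a n n i == n - 1) = false := by
        simp only [beq_eq_false_iff_ne, ne_eq]; omega
      have hnz : (runEnd a n n i + 1 == 0) = false := by simp
      simp only [hnlast, hnz, Bool.false_or, Nat.add_sub_cancel]
      exact flip_dir _ _ hne
    · simp only [bLoop, buildSubs, if_neg hi]
      rfl

-- ===== VERDICT (by name: the statement is the Claim_ definition above) =====
theorem is_valley_spec : Claim_equal_is_valley := by
  intro a _
  show is_valley a = is_valley_alt a
  unfold is_valley is_valley_alt
  rw [main_lemma a a.length a.length 0 true 0 (by omega) (fun _ => rfl)]
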